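-- pv_equiv track=rewrite | github.com/Olciaaa/ASD | wakacjeZASD/6/egzP6b/egzP6b.py | makingJumps
-- ===== SOURCE A (Python) =====
-- def makingJumps(M):
--     x = 0
--     y = 0
--     moves = {(x,y):True}
--
--     for el in M:
--         x, y = changePos(2, el[0], x, y)
--         x, y = changePos(1, el[1], x, y)
--
--         val = moves.get((x, y))
--         if val is None:
--             moves.update({(x, y): True})
--         else:
--             moves[(x, y)] = not val
--     return moves
--
-- def changePos(val, key, x, y):
--     if key == 'L':
--         x -= val
--     elif key == 'R':
--         x += val
--     elif key == 'U':
--         y += val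
--     else:
--         y -= val
--
--     return x, y
-- ===== SOURCE B (Python) =====
-- def makingJumps(M):
--     # Two-pass: record every visited position, then tally counts and return parity.
--     x = 0
--     y = 0
--     positions = [(0, 0)]
--     for el in M:
--         if el[0] == 'L':
--             x -= 2
--         elif el[0] == 'R':
--             x += 2
--         elif el[0] == 'U':
--             y += 2
--         else:
--             y -= 2
--         if el[1] == 'L':
--             x -= 1
--         elif el[1] == 'R':
--             x += 1
--         elif el[1] == 'U':
--             y += 1
--         else:
--             y -= 1
--         positions.append((x, y))
--     counts = {}
--     for p in positions:
--         counts[p] = counts.get(p, 0) + 1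
--     return {p: c % 2 == 1 for p, c in counts.items()}
-- ===== Notes on version B (the rewrite author's own statement) =====
-- stated objective: alternative
-- what changed: Replaces the running get/toggle dict updated during the walk by a two-pass structure: first collect the full list of visited positions (including the start), then count occurrences with a plain counting dict and return each position mapped to the parity of its count.
import Mathlib
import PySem

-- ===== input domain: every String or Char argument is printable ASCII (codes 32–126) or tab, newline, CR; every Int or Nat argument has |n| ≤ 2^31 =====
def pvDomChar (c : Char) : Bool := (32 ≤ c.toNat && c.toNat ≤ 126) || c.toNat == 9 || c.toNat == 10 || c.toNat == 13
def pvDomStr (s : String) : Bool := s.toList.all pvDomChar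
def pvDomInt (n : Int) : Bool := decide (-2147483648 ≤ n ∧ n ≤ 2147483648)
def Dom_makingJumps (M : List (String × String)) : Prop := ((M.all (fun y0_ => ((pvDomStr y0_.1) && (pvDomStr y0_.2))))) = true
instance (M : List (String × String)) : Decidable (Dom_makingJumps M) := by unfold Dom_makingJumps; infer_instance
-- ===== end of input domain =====

-- B collects the full list of visited positions first, then tallies counts and returns each
-- position mapped to the parity of its count (alternative decomposition, same cost).

-- ===== PORT A =====
def changePos (val : Int) (key : String) (x y : Int) : Int × Int :=
  if key = "L" then (x - val, y)
  else if key = "R" then (x + val, y)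
  else if key = "U" then (x, y + val)
  else (x, y - val)

def aStep (st : Int × Int × PySem.Dict (Int × Int) Bool) (el : String × String) :
    Int × Int × PySem.Dict (Int × Int) Bool :=
  let (x, y, moves) := st
  let (x, y) := changePos 2 el.1 x y
  let (x, y) := changePos 1 el.2 x y
  match moves.get? (x, y) with
  | none => (x, y, moves.insert (x, y) true)
  | some v => (x, y, moves.insert (x, y) (!v))

def makingJumps (M : List (String × String)) : List (Int × Int × Bool) :=
  let r := M.foldl aStep (0, 0, (PySem.Dict.empty (κ := Int × Int) (ν := Bool)).insert (0, 0) true)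
  r.2.2.items.map (fun pc => (pc.1.1, pc.1.2, pc.2))

-- ===== PORT B =====
def bMove (st : Int × Int × List (Int × Int)) (el : String × String) :
    Int × Int × List (Int × Int) :=
  let (x, y, ps) := st
  let (x, y) :=
    if el.1 = "L" then (x - 2, y)
    else if el.1 = "R" then (x + 2, y)
    else if el.1 = "U" then (x, y + 2)
    else (x, y - 2)
  let (x, y) :=
    if el.2 = "L" then (x - 1, y)
    else if el.2 = "R" then (x + 1, y)
    else if el.2 = "U" then (x, y + 1)
    else (x, y - 1)
  (x, y, ps ++ [(x, y)])

def makingJumps_alt (M : List (String × String)) : List (Int × Int × Bool) :=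
  let positions := (M.foldl bMove (0, 0, [((0 : Int), (0 : Int))])).2.2
  let counts := positions.foldl (fun d p => d.insert p (d.getD p 0 + 1))
    (PySem.Dict.empty (κ := Int × Int) (ν := Int))
  counts.items.map (fun pc => (pc.1.1, pc.1.2, PySem.Int.mod pc.2 2 == 1))

-- ===== PRECONDITION & SPEC =====
def Spec_makingJumps (M : List (String × String)) (out : List (Int × Int × Bool)) : Prop := out = makingJumps_alt M
instance (M : List (String × String)) (out : List (Int × Int × Bool)) : Decidable (Spec_makingJumps M out) := by unfold Spec_makingJumps; infer_instance

-- ===== CLAIM (what is proved, stated in full; the proofs are below) =====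
def Claim_equal_makingJumps : Prop := ∀ (M : List (String × String)), Dom_makingJumps M → Spec_makingJumps M (makingJumps M)

-- ===== LEMMAS AND PROOFS =====

-- the position reached from p by one move el (A's two changePos calls)
def move (p : Int × Int) (el : String × String) : Int × Int :=
  changePos 1 el.2 (changePos 2 el.1 p.1 p.2).1 (changePos 2 el.1 p.1 p.2).2

-- the list of positions visited after each move, starting from p (start excluded)
def path (p : Int × Int) : List (String × String) → List (Int × Int)
  | [] => []
  | el :: rest => move p el :: path (move p el) rest

-- A's toggle step, as an unconditional insert
def togStep (d : PySem.Dict (Int × Int) Bool) (q : Int × Int) : PySem.Dict (Int × Int) Bool :=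
  d.insert q (!(d.getD q false))

lemma aStep_eq (x y : Int) (d : PySem.Dict (Int × Int) Bool) (el : String × String) :
    aStep (x, y, d) el = ((move (x, y) el).1, (move (x, y) el).2, togStep d (move (x, y) el)) := by
  simp only [aStep, togStep, move]
  cases h : d.get? (changePos 1 el.2 (changePos 2 el.1 x y).1 (changePos 2 el.1 x y).2) <;>
    simp [PySem.Dict.getD_eq_get?_getD, h]

lemma bMove_eq (x y : Int) (ps : List (Int × Int)) (el : String × String) :
    bMove (x, y, ps) el = ((move (x, y) el).1, (move (x, y) el).2, ps ++ [move (x, y) el]) := by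
  simp only [bMove, move, changePos]

lemma aFold (M : List (String × String)) : ∀ (p : Int × Int) (d : PySem.Dict (Int × Int) Bool),
    (M.foldl aStep (p.1, p.2, d)).2.2 = (path p M).foldl togStep d := by
  induction M with
  | nil => intro p d; simp [path]
  | cons el rest ih =>
      intro p d
      simp only [List.foldl_cons, aStep_eq, path]
      exact ih (move p el) (togStep d (move p el))

lemma bFold (M : List (String × String)) : ∀ (p : Int × Int) (ps : List (Int × Int)),
    (M.foldl bMove (p.1, p.2, ps)).2.2 = ps ++ path p M := by
  induction M with
  | nil => intro p ps; simp [path]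
  | cons el rest ih =>
      intro p ps
      simp only [List.foldl_cons, bMove_eq, path]
      rw [ih (move p el) (ps ++ [move p el])]
      simp

lemma parity_succ (c : Nat) : decide ((c + 1) % 2 = 1) = !decide (c % 2 = 1) := by
  rcases Nat.mod_two_eq_zero_or_one c with h | h <;> simp [Nat.add_mod, h]

lemma getD_togFold (l : List (Int × Int)) : ∀ (d : PySem.Dict (Int × Int) Bool) (k : Int × Int),
    (l.foldl togStep d).getD k false = xor (d.getD k false) (decide (l.count k % 2 = 1)) := by
  induction l with
  | nil => intro d k; simp
  | cons q rest ih =>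
      intro d k
      simp only [List.foldl_cons, ih, togStep, PySem.Dict.getD_insert, List.count_cons]
      by_cases hk : k = q
      · subst hk
        simp [parity_succ]
      · have : (q == k) = false := by simp [Ne.symm hk]
        simp [hk, this]

lemma keys_togFold (l : List (Int × Int)) :
    (l.foldl togStep PySem.Dict.empty).keys = PySem.Set.ofList l := by
  rw [show togStep = (fun d q => d.insert q ((fun (d : PySem.Dict (Int × Int) Bool) q => !(d.getD q false)) d q)) from rfl,
    PySem.Dict.keys_foldl_insert]
  simp [PySem.Set.update_nil_left]

lemma nodup_togFold (l : List (Int × Int)) :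
    (l.foldl togStep PySem.Dict.empty).keys.Nodup := by
  rw [keys_togFold]; exact PySem.Set.nodup_ofList l

lemma parity_cast (c : Nat) :
    (PySem.Int.mod (c : Int) 2 == 1) = decide (c % 2 = 1) := by
  have h2 : (2 : Int) = ((2 : Nat) : Int) := rfl
  rw [h2, PySem.Int.mod_natCast]
  rcases Nat.mod_two_eq_zero_or_one c with h | h <;> simp [h]

lemma items_main (l : List (Int × Int)) :
    (l.foldl togStep PySem.Dict.empty).items.map (fun pc => (pc.1.1, pc.1.2, pc.2)) =
      (PySem.Dict.counter l).items.map
        (fun pc => (pc.1.1, pc.1.2, PySem.Int.mod pc.2 2 == 1)) := by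
  rw [PySem.Dict.items_counter,
    PySem.Dict.items_eq_map_keys (l.foldl togStep PySem.Dict.empty) (nodup_togFold l) false,
    keys_togFold]
  simp only [List.map_map]
  refine List.map_congr_left (fun k _ => ?_)
  simp only [Function.comp, getD_togFold, PySem.Dict.getD_empty, Bool.false_xor, parity_cast]

theorem makingJumps_eq_alt (M : List (String × String)) : makingJumps M = makingJumps_alt M := by
  simp only [makingJumps, makingJumps_alt]
  have hinit : (PySem.Dict.empty (κ := Int × Int) (ν := Bool)).insert (0, 0) true =
      togStep PySem.Dict.empty (0, 0) := by rfl
  rw [show ((0 : Int), (0 : Int), (PySem.Dict.empty (κ := Int × Int) (ν := Bool)).insert (0, 0) true) =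
      (((0 : Int), (0 : Int)).1, ((0 : Int), (0 : Int)).2, togStep PySem.Dict.empty (0, 0)) from by rw [hinit],
    aFold M (0, 0) (togStep PySem.Dict.empty (0, 0)),
    show ((0 : Int), (0 : Int), [((0 : Int), (0 : Int))]) =
      (((0 : Int), (0 : Int)).1, ((0 : Int), (0 : Int)).2, [((0 : Int), (0 : Int))]) from rfl,
    bFold M (0, 0) [(0, 0)], PySem.Dict.foldl_insert_getD_add_one_eq_counter]
  have : ((0, 0) :: path (0, 0) M).foldl togStep PySem.Dict.empty =
      (path (0, 0) M).foldl togStep (togStep PySem.Dict.empty (0, 0)) := rfl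
  rw [← this, items_main]
  rfl

-- ===== VERDICT (by name: the statement is the Claim_ definition above) =====
theorem makingJumps_spec : Claim_equal_makingJumps := by
  intro M _
  unfold Spec_makingJumps
  exact makingJumps_eq_alt M
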